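-- pv_equiv track=rewrite | github.com/LiangClub/SpaMFC | SpaMFC/annotation/markers.py | get_unique_markers
-- ===== SOURCE A (Python) =====
-- from typing import Dict, List, Optional
--
-- def get_unique_markers(
--
--     markers_dict: Dict[str, List[str]]
-- ) -> Dict[str, List[str]]:
--     """
--     Get subtype-specific unique marker genes
--
--     Parameters:
--         markers_dict: Dictionary of marker genes
--
--     Returns:
--         Dictionary of unique marker genes for each subtype
--     """
--     all_genes = set()
--     for genes in markers_dict.values():
--         all_genes.update(genes)
--
--     unique_markers = {}
--
--     for subtype, genes in markers_dict.items():
--         other_genes = set()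
--         for other_subtype, other_genes_list in markers_dict.items():
--             if other_subtype != subtype:
--                 other_genes.update(other_genes_list)
--
--         unique = [g for g in genes if g not in other_genes]
--         unique_markers[subtype] = unique
--
--     return unique_markers
-- ===== SOURCE B (Python) =====
-- def get_unique_markers(markers_dict):
--     # One pass: count in how many subtypes each gene occurs, then keep
--     # genes occurring in exactly one subtype.
--     count = {}
--     for genes in markers_dict.values():
--         for g in set(genes):
--             count[g] = count.get(g, 0) + 1
--     return {subtype: [g for g in genes if count[g] == 1]
--             for subtype, genes in markers_dict.items()}
-- ===== Notes on version B (the rewrite author's own statement) =====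
-- stated objective: faster
-- what changed: Instead of rebuilding, for every subtype, the union of all OTHER subtypes' gene lists (a nested scan), B counts in one pass how many subtypes contain each gene and keeps the genes with count 1; Pre_ only restricts the association list to distinct subtype keys, i.e. to lists that actually represent a Python dict.
import Mathlib
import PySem

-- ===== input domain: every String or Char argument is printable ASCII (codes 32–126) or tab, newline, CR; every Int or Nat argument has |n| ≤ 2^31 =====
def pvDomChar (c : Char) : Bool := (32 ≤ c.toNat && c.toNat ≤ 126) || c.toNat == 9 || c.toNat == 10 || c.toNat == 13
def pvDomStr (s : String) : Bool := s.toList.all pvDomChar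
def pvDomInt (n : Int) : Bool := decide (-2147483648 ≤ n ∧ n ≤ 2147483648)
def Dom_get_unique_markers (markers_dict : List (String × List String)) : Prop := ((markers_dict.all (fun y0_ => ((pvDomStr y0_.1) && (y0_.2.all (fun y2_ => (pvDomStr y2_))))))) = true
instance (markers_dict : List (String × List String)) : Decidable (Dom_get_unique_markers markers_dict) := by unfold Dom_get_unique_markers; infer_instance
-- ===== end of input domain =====

-- B replaces A's per-subtype rescan of all other subtypes' lists with a single
-- gene -> number-of-subtypes counting pass (objective: faster, asymptotically).

-- ===== PORT A =====
def get_unique_markers (markers_dict : List (String × List String)) : List (String × List String) :=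
  -- all_genes is built by the Python but never used; kept for faithfulness
  let _all_genes : PySem.Set String :=
    markers_dict.foldl (fun s p => PySem.Set.update s p.2) PySem.Set.empty
  (markers_dict.foldl
    (fun (um : PySem.Dict String (List String)) p =>
      let other : PySem.Set String :=
        markers_dict.foldl
          (fun s q => if q.1 ≠ p.1 then PySem.Set.update s q.2 else s)
          PySem.Set.empty
      um.insert p.1 (p.2.filter (fun g => !(PySem.Set.contains other g))))
    PySem.Dict.empty).items

-- ===== PORT B =====
def get_unique_markers_alt (markers_dict : List (String × List String)) : List (String × List String) :=
  let count : PySem.Dict String Int :=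
    markers_dict.foldl
      (fun (d : PySem.Dict String Int) p =>
        (PySem.Set.ofList p.2).foldl (fun d g => d.insert g (d.getD g 0 + 1)) d)
      PySem.Dict.empty
  (markers_dict.foldl
    (fun (um : PySem.Dict String (List String)) p =>
      um.insert p.1 (p.2.filter (fun g => count.getD g 0 == 1)))
    PySem.Dict.empty).items

-- ===== PRECONDITION & SPEC =====
-- Pre_ restricts the association list to pairwise-distinct subtype keys: the Python
-- argument is a dict, which cannot contain duplicate keys, so no excluded input is
-- expressible as an input of the Python function.
def Pre_get_unique_markers (markers_dict : List (String × List String)) : Prop :=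
  (markers_dict.map Prod.fst).Nodup
instance (markers_dict : List (String × List String)) : Decidable (Pre_get_unique_markers markers_dict) := by unfold Pre_get_unique_markers; infer_instance

def pvWitness_get_unique_markers : (List (String × List String)) :=
  [("A", ["g1", "g2"]), ("B", ["g2", "g3"]), ("C", [])]

def Spec_get_unique_markers (markers_dict : List (String × List String)) (out : List (String × List String)) : Prop := out = get_unique_markers_alt markers_dict
instance (markers_dict : List (String × List String)) (out : List (String × List String)) : Decidable (Spec_get_unique_markers markers_dict out) := by unfold Spec_get_unique_markers; infer_instance

-- ===== CLAIM (what is proved, stated in full; the proofs are below) =====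
def Claim_equal_get_unique_markers : Prop := ∀ (markers_dict : List (String × List String)), Dom_get_unique_markers markers_dict → Pre_get_unique_markers markers_dict → Spec_get_unique_markers markers_dict (get_unique_markers markers_dict)

-- ===== LEMMAS AND PROOFS =====

-- B's counter: count.getD g 0 = number of entries of md whose gene list contains g.
lemma cnt_getD (md : List (String × List String)) (d : PySem.Dict String Int) (g : String) :
    (md.foldl
      (fun (d : PySem.Dict String Int) p =>
        (PySem.Set.ofList p.2).foldl (fun d g => d.insert g (d.getD g 0 + 1)) d)
      d).getD g 0
    = d.getD g 0 + (md.countP (fun q => decide (g ∈ q.2)) : Int) := by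
  induction md generalizing d with
  | nil => simp
  | cons p md ih =>
    simp only [List.foldl_cons, ih, PySem.Dict.getD_foldl_insert_add_one,
      List.countP_cons]
    have : List.count g (PySem.Set.ofList p.2) = if g ∈ p.2 then 1 else 0 := by
      rw [List.Nodup.count (PySem.Set.nodup_ofList p.2)]
      simp [PySem.Set.mem_ofList]
    rw [this]
    by_cases h : g ∈ p.2
    · simp [h]; omega
    · simp [h]

-- A's inner loop: membership in other_genes.
lemma mem_other (md : List (String × List String)) (k : String) (g : String)
    (s : PySem.Set String) :
    g ∈ md.foldl (fun s q => if q.1 ≠ k then PySem.Set.update s q.2 else s) s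
    ↔ g ∈ s ∨ ∃ q ∈ md, q.1 ≠ k ∧ g ∈ q.2 := by
  induction md generalizing s with
  | nil => simp
  | cons p md ih =>
    simp only [List.foldl_cons, ih]
    by_cases h : p.1 ≠ k
    · simp only [if_pos h, PySem.Set.mem_update]
      constructor
      · rintro ((hs | hp) | ⟨q, hq, hne, hg⟩)
        · exact Or.inl hs
        · exact Or.inr ⟨p, by simp, h, hp⟩
        · exact Or.inr ⟨q, by simp [hq], hne, hg⟩
      · rintro (hs | ⟨q, hq, hne, hg⟩)
        · exact Or.inl (Or.inl hs)
        · rcases List.mem_cons.mp hq with rfl | hq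
          · exact Or.inl (Or.inr hg)
          · exact Or.inr ⟨q, hq, hne, hg⟩
    · simp only [if_neg h]
      rw [not_ne_iff] at h
      constructor
      · rintro (hs | ⟨q, hq, hne, hg⟩)
        · exact Or.inl hs
        · exact Or.inr ⟨q, by simp [hq], hne, hg⟩
      · rintro (hs | ⟨q, hq, hne, hg⟩)
        · exact Or.inl hs
        · rcases List.mem_cons.mp hq with rfl | hq
          · exact absurd h hne
          · exact Or.inr ⟨q, hq, hne, hg⟩

-- With distinct keys, "g occurs in some OTHER subtype's list" is exactly
-- "g occurs in ≠ 1 (i.e. ≥ 2) entries", for g in the current entry's list.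
lemma countP_eq_one_iff (md : List (String × List String))
    (hnd : (md.map Prod.fst).Nodup) (p : String × List String) (hp : p ∈ md)
    (g : String) (hg : g ∈ p.2) :
    md.countP (fun q => decide (g ∈ q.2)) = 1
    ↔ ¬ ∃ q ∈ md, q.1 ≠ p.1 ∧ g ∈ q.2 := by
  obtain ⟨l1, l2, rfl⟩ := List.append_of_mem hp
  have hkey : ∀ q, (q ∈ l1 ∨ q ∈ l2) → q.1 ≠ p.1 := by
    intro q hq heq
    simp only [List.map_append, List.map_cons, List.nodup_append, List.nodup_cons] at hnd
    obtain ⟨-, ⟨hp1, -⟩, hdisj⟩ := hnd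
    rcases hq with h1 | h2
    · exact hdisj q.1 (List.mem_map_of_mem h1) p.1 List.mem_cons_self heq
    · exact hp1 (by rw [← heq]; exact List.mem_map_of_mem h2)
  rw [List.countP_append, List.countP_cons]
  have hpg : (decide (g ∈ p.2) = true) := by simp [hg]
  rw [if_pos hpg]
  constructor
  · intro h1 ⟨q, hq, hne, hgq⟩
    have hz1 : l1.countP (fun q => decide (g ∈ q.2)) = 0 := by omega
    have hz2 : l2.countP (fun q => decide (g ∈ q.2)) = 0 := by omega
    rcases List.mem_append.mp hq with hq1 | hq2
    · exact (List.countP_eq_zero.mp hz1 q hq1) (by simp [hgq])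
    · rcases List.mem_cons.mp hq2 with rfl | hq2
      · exact hne rfl
      · exact (List.countP_eq_zero.mp hz2 q hq2) (by simp [hgq])
  · intro h
    have hz1 : l1.countP (fun q => decide (g ∈ q.2)) = 0 := by
      rw [List.countP_eq_zero]
      intro q hq hgq
      exact h ⟨q, by simp [hq], hkey q (Or.inl hq), by simpa using hgq⟩
    have hz2 : l2.countP (fun q => decide (g ∈ q.2)) = 0 := by
      rw [List.countP_eq_zero]
      intro q hq hgq
      exact h ⟨q, by simp [hq], hkey q (Or.inr hq), by simpa using hgq⟩
    omega

-- ===== VERDICT (by name: the statement is the Claim_ definition above) =====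
theorem get_unique_markers_spec : Claim_equal_get_unique_markers := by
  intro md _ hpre
  unfold Spec_get_unique_markers get_unique_markers get_unique_markers_alt
  simp only []
  congr 1
  apply PySem.List.foldl_congr_mem
  intro um p hp
  congr 1
  apply List.filter_congr
  intro g hg
  rw [cnt_getD]
  simp only [PySem.Dict.getD_empty, zero_add]
  have hiff := countP_eq_one_iff md hpre p hp g hg
  have hmem := mem_other md p.1 g PySem.Set.empty
  by_cases h : ∃ q ∈ md, q.1 ≠ p.1 ∧ g ∈ q.2
  · have h1 : md.countP (fun q => decide (g ∈ q.2)) ≠ 1 := fun hc => (hiff.mp hc) h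
    have h2 : g ∈ md.foldl (fun s q => if q.1 ≠ p.1 then PySem.Set.update s q.2 else s) PySem.Set.empty :=
      hmem.mpr (Or.inr h)
    rw [(PySem.Set.contains_iff _ g).mpr h2]
    simp
    omega
  · have h1 : md.countP (fun q => decide (g ∈ q.2)) = 1 := hiff.mpr h
    have h2 : g ∉ md.foldl (fun s q => if q.1 ≠ p.1 then PySem.Set.update s q.2 else s) PySem.Set.empty := by
      intro hc
      rcases hmem.mp hc with hs | he
      · simp [PySem.Set.empty] at hs
      · exact h he
    rw [← PySem.Set.contains_iff] at h2
    simp only [Bool.not_eq_true] at h2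
    rw [h2]
    simp [h1]
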